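-- pv_equiv track=rewrite | github.com/code-saturne/code_saturne | bin/cs_exec_environment.py | update_command_no_value
-- ===== SOURCE A (Python) =====
-- def update_command_no_value(args, options, present):
--     """
--     Adds, updates, or removes parts of a command to pass a given option.
--     The command is provided as a list, and options defining a value may be
--     defined as a tuple (to allow for multiple variants).
--
--     If no option was previously present and a value is added, the first
--     syntax of the options tuple will be used.
--     """
--
--     # Update first occurence
--
--     count = 0
--     target = 0
--     if present:
--         target = 1
--
--     for opt in options:
--         j = 0
--         while j < len(args):
--             if args[j] == opt:
--                 count += 1
--                 if count > target:
--                     args.pop(j)       # option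
--                 else:
--                     j += 1
--             else:
--                 j += 1
--
--     if count < target:
--         args.append(options[0])
--
--     # Special cases at end
--
--     i = 0
--     args_tail = []
--     while i < len(args):
--         if args[i][0] == '$' or args[i] == '&':
--              a = args.pop(i)
--              args_tail.append(a)
--         else:
--              i = i+1
--     args += args_tail
--
--     # Return updated list
--
--     return args
-- ===== SOURCE B (Python) =====
-- def update_command_no_value(args, options, present):
--     # Decide which single occurrence survives: the first occurrence in args
--     # of the first option (in options order) that occurs at all.
--     keep = None
--     if present:
--         for opt in options:
--             if opt in args:
--                 keep = args.index(opt)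
--                 break
--     # One filtering pass: drop every option except the kept occurrence.
--     result = [a for i, a in enumerate(args) if a not in options or i == keep]
--     if present and keep is None:
--         result.append(options[0])
--     # Stable partition: '$...' and '&' arguments go to the tail.
--     head = [a for a in result if not (a[0] == '$' or a == '&')]
--     tail = [a for a in result if a[0] == '$' or a == '&']
--     args[:] = head + tail
--     return args
-- ===== Notes on version B (the rewrite author's own statement) =====
-- stated objective: simpler
-- what changed: Instead of A's destructive option-by-option rescans with a running count plus an index-juggling pop loop for the tail, B first selects the single surviving index (first occurrence of the first option present), then builds the result in one filtering pass over enumerate(args), and partitions head/tail with two comprehensions.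
-- outside the precondition, e.g. on update_command_no_value(['-x'], ('-x', '-x'), True): A returns [], B returns ['-x']
import Mathlib
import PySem

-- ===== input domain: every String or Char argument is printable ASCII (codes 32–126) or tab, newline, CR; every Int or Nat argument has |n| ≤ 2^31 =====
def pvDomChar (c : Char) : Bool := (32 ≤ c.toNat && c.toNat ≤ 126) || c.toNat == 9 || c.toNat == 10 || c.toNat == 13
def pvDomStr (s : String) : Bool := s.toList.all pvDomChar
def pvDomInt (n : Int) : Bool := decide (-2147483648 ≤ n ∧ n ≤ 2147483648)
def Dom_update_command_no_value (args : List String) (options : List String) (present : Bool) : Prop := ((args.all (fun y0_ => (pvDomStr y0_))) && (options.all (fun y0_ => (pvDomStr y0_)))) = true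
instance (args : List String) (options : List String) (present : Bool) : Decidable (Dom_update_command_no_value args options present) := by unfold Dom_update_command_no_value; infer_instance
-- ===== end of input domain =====

-- B replaces A's destructive rescans + pop loops by select-winner-index, one filtering
-- pass, and a two-comprehension stable partition (objective: simpler). Both A and B
-- mutate `args` in place identically (final list assigned back); the equivalence proved
-- here is about the returned list.

-- ===== PORT A =====
-- args[i][0] == '$' or args[i] == '&'  (a[0] on "" raises in Python; excluded by Pre_)
def pvTailCond (a : String) : Bool := (PySem.Str.pyGet? a 0 == some '$') || (a == "&")

-- the inner `while j < len(args)` scan for one opt: pop when count exceeds target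
def pvScanOpt (target : Int) (opt : String) : List String → Int → (List String × Int)
  | [], count => ([], count)
  | a :: rest, count =>
    if a == opt then
      if count + 1 > target then pvScanOpt target opt rest (count + 1)
      else
        let s := pvScanOpt target opt rest (count + 1)
        (a :: s.1, s.2)
    else
      let s := pvScanOpt target opt rest count
      (a :: s.1, s.2)

-- the final while loop: pop '$…'/'&' args into args_tail, in order
def pvTailSplit : List String → (List String × List String)
  | [] => ([], [])
  | a :: rest =>
    let s := pvTailSplit rest
    if pvTailCond a then (s.1, a :: s.2) else (a :: s.1, s.2)

def update_command_no_value (args : List String) (options : List String) (present : Bool) : List String :=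
  let target : Int := if present then 1 else 0
  let s := options.foldl (fun st opt => pvScanOpt target opt st.1 st.2) (args, 0)
  -- options[0] raises on empty options in Python; total stand-in headI, excluded by Pre_
  let args1 := if s.2 < target then s.1 ++ [options.headI] else s.1
  let sp := pvTailSplit args1
  sp.1 ++ sp.2

-- ===== PORT B =====
-- for opt in options: if opt in args: keep = args.index(opt); break
def pvFindKeep : List String → List String → Option Nat
  | [], _ => none
  | o :: os, l => if l.contains o then PySem.List.index? l o else pvFindKeep os l

-- [a for i, a in enumerate(args) if a not in options or i == keep]
def pvKeepFilter (options : List String) (keep : Option Nat) : Nat → List String → List String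
  | _, [] => []
  | i, a :: r =>
    if !(options.contains a) || keep == some i then a :: pvKeepFilter options keep (i + 1) r
    else pvKeepFilter options keep (i + 1) r

def update_command_no_value_alt (args : List String) (options : List String) (present : Bool) : List String :=
  let keep := if present then pvFindKeep options args else none
  let result0 := pvKeepFilter options keep 0 args
  -- options[0] raises on empty options in Python; total stand-in headI, excluded by Pre_
  let result := if present && keep == none then result0 ++ [options.headI] else result0
  result.filter (fun a => !pvTailCond a) ++ result.filter pvTailCond

-- ===== PRECONDITION & SPEC =====
-- Pre_ excludes (a) inputs where A raises IndexError: an empty string in args that is not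
-- removed as an option (args[i][0] on "" in the final loop; B raises there too), and, with
-- present set and no option matched, an empty or ""-headed options list (options[0]);
-- (b) with present set, inputs whose winning option (the first one occurring in args) is
-- listed twice in options, on which A's repeated rescan pops even the occurrence it had
-- chosen to keep — an accidental corner of the count mechanism for 'variant' spellings
-- that are normally distinct (see cite).
def Pre_update_command_no_value (args : List String) (options : List String) (present : Bool) : Prop :=
  (present = true →
      ((∃ o ∈ options, o ∈ args) ∨ (options ≠ [] ∧ options.headI ≠ "")) ∧
      (∀ o ∈ options, o ∈ args →
        (∀ p ∈ options.takeWhile (fun x => x != o), p ∉ args) → options.count o ≤ 1)) ∧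
  (∀ a ∈ args, a = "" →
    "" ∈ options ∧ (present = true → ∃ o ∈ options.takeWhile (fun x => x != ""), o ∈ args))
instance (args : List String) (options : List String) (present : Bool) : Decidable (Pre_update_command_no_value args options present) := by unfold Pre_update_command_no_value; infer_instance

def pvWitness_update_command_no_value : List String × List String × Bool := (["-a", "x"], ["-a"], true)

def Spec_update_command_no_value (args : List String) (options : List String) (present : Bool) (out : List String) : Prop := out = update_command_no_value_alt args options present
instance (args : List String) (options : List String) (present : Bool) (out : List String) : Decidable (Spec_update_command_no_value args options present out) := by unfold Spec_update_command_no_value; infer_instance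

-- ===== CLAIM (what is proved, stated in full; the proofs are below) =====
def Claim_equal_update_command_no_value : Prop := ∀ (args : List String) (options : List String) (present : Bool), Dom_update_command_no_value args options present → Pre_update_command_no_value args options present → Spec_update_command_no_value args options present (update_command_no_value args options present)

-- ===== LEMMAS AND PROOFS =====

-- A's scan once count has reached target: removes every occurrence of opt
theorem pvScanOpt_sat (t : Int) (o : String) (l : List String) (c : Int) (h : t ≤ c) :
    pvScanOpt t o l c = (l.filter (fun a => !(a == o)), c + (l.count o : Int)) := by
  induction l generalizing c with
  | nil => simp [pvScanOpt]
  | cons a r ih =>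
    by_cases hao : a = o
    · subst hao
      have hgt : c + 1 > t := by omega
      simp [pvScanOpt, hgt, ih (c + 1) (by omega)]
      ring
    · have hbeq : (a == o) = false := by simp [hao]
      simp [pvScanOpt, hbeq, ih c h, hao]

-- A's scan when opt does not occur: no change
theorem pvScanOpt_notmem (t : Int) (o : String) (l : List String) (c : Int) (h : o ∉ l) :
    pvScanOpt t o l c = (l, c) := by
  induction l generalizing c with
  | nil => simp [pvScanOpt]
  | cons a r ih =>
    rw [List.mem_cons, not_or] at h
    have hao : (a == o) = false := by simp [Ne.symm h.1]
    simp [pvScanOpt, hao, ih c h.2]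

-- what A's first successful scan keeps: first occurrence stays, the rest go
def pvKeepFirst (o : String) : List String → List String
  | [] => []
  | a :: r => if a == o then a :: r.filter (fun x => !(x == o)) else a :: pvKeepFirst o r

theorem pvScanOpt_first (o : String) (l : List String) (h : o ∈ l) :
    pvScanOpt 1 o l 0 = (pvKeepFirst o l, (l.count o : Int)) := by
  induction l with
  | nil => simp at h
  | cons a r ih =>
    by_cases hao : a = o
    · subst hao
      have e : (0 : Int) + 1 = 1 := by ring
      simp only [pvScanOpt, beq_self_eq_true, if_true, e]
      rw [pvScanOpt_sat 1 a r 1 (le_refl 1)]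
      simp [pvKeepFirst]
      omega
    · have hbeq : (a == o) = false := by simp [hao]
      have hr : o ∈ r := by
        rcases List.mem_cons.mp h with h1 | h1
        · exact absurd h1.symm hao
        · exact h1
      simp [pvScanOpt, hbeq, ih hr, pvKeepFirst, hao]

-- pointwise identity used to merge successive removals into one membership test
theorem pvFilter_merge (o : String) (os : List String) (l : List String) :
    (l.filter (fun a => !(a == o))).filter (fun a => !os.contains a)
      = l.filter (fun a => !(o :: os).contains a) := by
  rw [List.filter_filter]
  apply List.filter_congr
  intro a _
  simp only [List.contains_cons, Bool.not_or, Bool.and_comm]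

-- the saturated fold: every remaining option gets fully removed, count never drops
theorem pvFold_sat (t : Int) (opts : List String) (l : List String) (c : Int) (h : t ≤ c) :
    (opts.foldl (fun st opt => pvScanOpt t opt st.1 st.2) (l, c)).1
        = l.filter (fun a => !opts.contains a)
      ∧ c ≤ (opts.foldl (fun st opt => pvScanOpt t opt st.1 st.2) (l, c)).2 := by
  induction opts generalizing l c with
  | nil => simp
  | cons o os ih =>
    simp only [List.foldl_cons]
    rw [pvScanOpt_sat t o l c h]
    have hc' : t ≤ c + (l.count o : Int) := by
      have : (0 : Int) ≤ (l.count o : Int) := by positivity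
      omega
    obtain ⟨h1, h2⟩ := ih (l.filter (fun a => !(a == o))) (c + (l.count o : Int)) hc'
    refine ⟨?_, ?_⟩
    · rw [h1, pvFilter_merge]
    · have : (0 : Int) ≤ (l.count o : Int) := by positivity
      omega

-- B's filter when the kept index is already passed (or absent): plain removal
theorem pvKeepFilter_stale (opts : List String) (keep : Option Nat) (i : Nat) (l : List String)
    (h : ∀ j, keep = some j → j < i) :
    pvKeepFilter opts keep i l = l.filter (fun a => !opts.contains a) := by
  induction l generalizing i with
  | nil => simp [pvKeepFilter]
  | cons a r ih =>
    have hk : (keep == some i) = false := by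
      cases keep with
      | none => rfl
      | some j =>
        have := h j rfl
        simp
        omega
    simp only [pvKeepFilter, hk, Bool.or_false]
    rw [ih (i + 1) (fun j hj => by have := h j hj; omega)]
    by_cases hm : a ∈ opts
    · simp [hm]
    · simp [hm]

-- B's filter only inspects membership of elements of l
theorem pvKeepFilter_congr (opts opts' : List String) (keep : Option Nat) (i : Nat) (l : List String)
    (h : ∀ a ∈ l, opts.contains a = opts'.contains a) :
    pvKeepFilter opts keep i l = pvKeepFilter opts' keep i l := by
  induction l generalizing i with
  | nil => rfl
  | cons a r ih =>
    have ha := h a (by simp)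
    simp only [pvKeepFilter, ha]
    rw [ih (i + 1) (fun b hb => h b (by simp [hb]))]

-- the crux: B's single filtering pass with the winner's index equals A's keep-first scan
-- followed by full removal of the remaining options
theorem pvKeepFilter_winner (o : String) (post : List String) (l : List String) (i : Nat)
    (hmem : o ∈ l) (hpost : o ∉ post) :
    pvKeepFilter (o :: post) (some (i + l.idxOf o)) i l
      = (pvKeepFirst o l).filter (fun a => !post.contains a) := by
  induction l generalizing i with
  | nil => simp at hmem
  | cons a r ih =>
    by_cases hao : a = o
    · subst hao
      have hidx : (a :: r).idxOf a = 0 := List.idxOf_cons_self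
      have hk : ((some (i + (a :: r).idxOf a) : Option Nat) == some i) = true := by
        simp [hidx]
      simp only [pvKeepFilter, hk, Bool.or_true, if_true]
      rw [pvKeepFilter_stale (a :: post) (some (i + (a :: r).idxOf a)) (i + 1) r
        (fun j hj => by simp only [hidx] at hj; injection hj with hj; omega)]
      have hpostA : post.contains a = false := by simp [hpost]
      simp only [pvKeepFirst, beq_self_eq_true, if_true, List.filter_cons, hpostA,
        Bool.not_false]
      congr 1
      exact (pvFilter_merge a post r).symm
    · have hbeq : (a == o) = false := by simp [hao]
      have hr : o ∈ r := by
        rcases List.mem_cons.mp hmem with h1 | h1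
        · subst h1; exact absurd rfl hao
        · exact h1
      have hidx : (a :: r).idxOf o = r.idxOf o + 1 := by
        simp [List.idxOf_cons, hbeq]
      have hk : ((some (i + (a :: r).idxOf o) : Option Nat) == some i) = false := by
        simp only [hidx, beq_eq_false_iff_ne, ne_eq, Option.some.injEq]
        omega
      have harith : i + (a :: r).idxOf o = (i + 1) + r.idxOf o := by omega
      by_cases hin : (o :: post).contains a = true
      · -- a is a later option occurrence (in post): dropped by both
        have hapost : a ∈ post := by
          simp only [List.contains_cons, Bool.or_eq_true, beq_iff_eq] at hin
          rcases hin with h1 | h1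
          · subst h1; exact absurd rfl hao
          · simpa using h1
        simp only [pvKeepFilter, hin, Bool.not_true, Bool.false_or, hk]
        rw [harith, ih (i + 1) hr]
        have hpa : post.contains a = true := by simp [hapost]
        simp [pvKeepFirst, hbeq, hapost]
      · simp only [Bool.not_eq_true] at hin
        simp only [pvKeepFilter, hin, Bool.not_false, Bool.true_or, if_true, hk]
        rw [harith, ih (i + 1) hr]
        have hpa : a ∉ post := by
          simp only [List.contains_cons, Bool.or_eq_false_iff] at hin
          simpa using hin.2
        simp [pvKeepFirst, hbeq, hpa]

-- A's pop loop for the tail is a stable partition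
theorem pvTailSplit_eq (l : List String) :
    pvTailSplit l = (l.filter (fun a => !pvTailCond a), l.filter pvTailCond) := by
  induction l with
  | nil => rfl
  | cons a r ih =>
    simp only [pvTailSplit, ih]
    by_cases h : pvTailCond a = true
    · simp [h]
    · simp only [Bool.not_eq_true] at h
      simp [h]

-- membership gives the concrete index A keeps and B selects
theorem pvIdxOf?_mem (o : String) (l : List String) (h : o ∈ l) :
    l.idxOf? o = some (l.idxOf o) := by
  induction l with
  | nil => simp at h
  | cons a r ih =>
    by_cases hao : o = a
    · subst hao
      simp [List.idxOf?_cons, List.idxOf_cons_self]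
    · have hb : (a == o) = false := by simp [Ne.symm hao]
      have hr : o ∈ r := by
        rcases List.mem_cons.mp h with h1 | h1
        · exact absurd h1 hao
        · exact h1
      simp [List.idxOf?_cons, List.idxOf_cons, hb, ih hr]

-- main correspondence for present = true, parallel induction on the options
theorem pvMain_present (opts : List String) (l : List String)
    (hwu : ∀ o ∈ opts, o ∈ l → (∀ p ∈ opts.takeWhile (fun x => x != o), p ∉ l) → opts.count o ≤ 1) :
    (pvFindKeep opts l = none →
        opts.foldl (fun st opt => pvScanOpt 1 opt st.1 st.2) (l, 0) = (l, 0)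
          ∧ (∀ a ∈ l, opts.contains a = false))
    ∧ (∀ k, pvFindKeep opts l = some k →
        (opts.foldl (fun st opt => pvScanOpt 1 opt st.1 st.2) (l, 0)).1
            = pvKeepFilter opts (some k) 0 l
          ∧ 1 ≤ (opts.foldl (fun st opt => pvScanOpt 1 opt st.1 st.2) (l, 0)).2) := by
  induction opts with
  | nil =>
    refine ⟨fun _ => ⟨by simp, by intro a _; rfl⟩, fun k hk => by simp [pvFindKeep] at hk⟩
  | cons o os ih =>
    by_cases hol : o ∈ l
    · -- o is the winner; Pre_ says its spelling is not duplicated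
      have hcnt : (o :: os).count o ≤ 1 := by
        refine hwu o List.mem_cons_self hol ?_
        intro p hp
        simp at hp
      have hoos : o ∉ os := by
        rw [List.count_cons_self] at hcnt
        exact List.count_eq_zero.mp (by omega)
      have hcont : l.contains o = true := by simp [hol]
      have hfk : pvFindKeep (o :: os) l = some (l.idxOf o) := by
        simp only [pvFindKeep, hcont, if_true, PySem.List.index?_eq_idxOf?]
        exact pvIdxOf?_mem o l hol
      refine ⟨fun hnone => absurd (hfk ▸ hnone) (by simp), ?_⟩
      intro k hk
      rw [hfk, Option.some.injEq] at hk
      subst hk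
      simp only [List.foldl_cons]
      rw [pvScanOpt_first o l hol]
      have hc1 : (1 : Int) ≤ (l.count o : Int) := by
        have := List.count_pos_iff.mpr hol
        exact_mod_cast this
      obtain ⟨h1, h2⟩ := pvFold_sat 1 os (pvKeepFirst o l) ((l.count o : Int)) hc1
      refine ⟨?_, by omega⟩
      rw [h1]
      have hw := pvKeepFilter_winner o os l 0 hol hoos
      simp only [Nat.zero_add] at hw
      rw [hw]
    · -- o absent: skip it on both sides
      have hwu' : ∀ o' ∈ os, o' ∈ l → (∀ p ∈ os.takeWhile (fun x => x != o'), p ∉ l) → os.count o' ≤ 1 := by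
        intro o' ho' hol' hp
        have hne : (o != o') = true := by
          simp only [bne_iff_ne, ne_eq]
          exact fun h => hol (h ▸ hol')
        have hmain := hwu o' (List.mem_cons_of_mem _ ho') hol' (by
          intro p hpm
          simp only [List.takeWhile_cons, hne, if_true, List.mem_cons] at hpm
          rcases hpm with rfl | hpm
          · exact hol
          · exact hp p hpm)
        have hcc : List.count o' (o :: os) = List.count o' os := by
          simp [bne_iff_ne.mp hne]
        rwa [hcc] at hmain
      have hcont : l.contains o = false := by simp [hol]
      have hfk : pvFindKeep (o :: os) l = pvFindKeep os l := by
        simp only [pvFindKeep, hcont, Bool.false_eq_true, if_false]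
      have hfold : ((o :: os).foldl (fun st opt => pvScanOpt 1 opt st.1 st.2) (l, 0))
          = (os.foldl (fun st opt => pvScanOpt 1 opt st.1 st.2) (l, 0)) := by
        simp only [List.foldl_cons]
        rw [pvScanOpt_notmem 1 o l 0 hol]
      have hext : ∀ a ∈ l, (a == o) = false := by
        intro a ha
        have : a ≠ o := fun he => hol (he ▸ ha)
        simp [this]
      constructor
      · intro hnone
        rw [hfk] at hnone
        obtain ⟨h1, h2⟩ := (ih hwu').1 hnone
        refine ⟨by rw [hfold]; exact h1, ?_⟩
        intro a ha
        simp only [List.contains_cons, hext a ha, Bool.false_or]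
        exact h2 a ha
      · intro k hk
        rw [hfk] at hk
        obtain ⟨h1, h2⟩ := (ih hwu').2 k hk
        refine ⟨?_, by rw [hfold]; exact h2⟩
        rw [hfold, h1]
        apply pvKeepFilter_congr
        intro a ha
        simp only [List.contains_cons, hext a ha, Bool.false_or]

-- ===== VERDICT (by name: the statement is the Claim_ definition above) =====
theorem update_command_no_value_spec : Claim_equal_update_command_no_value := by
  intro args options present _hDom hPre
  obtain ⟨hpr, _hne⟩ := hPre
  simp only [Spec_update_command_no_value, update_command_no_value, update_command_no_value_alt]
  cases present with
  | false =>
    simp only [Bool.false_and, if_false, Bool.false_eq_true]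
    obtain ⟨h1, h2⟩ := pvFold_sat 0 options args 0 (le_refl 0)
    have hs2 : ¬ ((options.foldl (fun st opt => pvScanOpt 0 opt st.1 st.2) (args, 0)).2 < 0) := by
      omega
    simp only [hs2, if_false]
    rw [pvKeepFilter_stale options none 0 args (fun j hj => by simp at hj)]
    rw [pvTailSplit_eq, h1]
  | true =>
    simp only [Bool.true_and, if_true]
    have hmain := pvMain_present options args (hpr rfl).2
    cases hfk : pvFindKeep options args with
    | none =>
      obtain ⟨h1, h2⟩ := hmain.1 hfk
      rw [h1]
      have hlt : ((0 : Int) < 1) := by omega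
      simp only [if_pos hlt]
      have hkf : pvKeepFilter options none 0 args = args := by
        rw [pvKeepFilter_stale options none 0 args (fun j hj => by simp at hj)]
        apply List.filter_eq_self.mpr
        intro a ha
        simpa using h2 a ha
      rw [pvTailSplit_eq]
      simp [hkf]
    | some k =>
      obtain ⟨h1, h2⟩ := hmain.2 k hfk
      have hnlt : ¬ ((options.foldl (fun st opt => pvScanOpt 1 opt st.1 st.2) (args, 0)).2 < 1) := by
        omega
      rw [if_neg hnlt]
      have hko : ((some k : Option Nat) == none) = false := rfl
      simp only [hko, Bool.false_eq_true, if_false]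
      rw [pvTailSplit_eq, h1]
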